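-- pv_equiv track=rewrite | github.com/olzlgur/baekjoon-practice | ebay/2.py | solution
-- ===== SOURCE A (Python) =====
-- def solution(b):
--     answer = -1
--     temp = b**2
--
--     for i in range(1, b+1):
--         for j in range(b+1, 500001):
--             if i**2 + temp == j**2:
--                 return j
--             elif i**2 + temp < j**2:
--                 break
--
--     return answer
-- ===== SOURCE B (Python) =====
-- def solution(b):
--     # Two-pointer: j advances monotonically since i*i + b*b increases with i.
--     j = b + 1
--     for i in range(1, b + 1):
--         s = i * i + b * b
--         while j <= 500000 and j * j < s:
--             j += 1
--         if j > 500000: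
--             return -1
--         if j * j == s:
--             return j
--     return -1
-- ===== Notes on version B (the rewrite author's own statement) =====
-- stated objective: faster
-- what changed: Replaced the per-i rescan of j from b+1 (nested loops) by a single monotone two-pointer: since i*i+b*b grows with i, one shared j pointer only ever advances, and once it passes 500000 no later i can match, so B returns -1 immediately.
import Mathlib
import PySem

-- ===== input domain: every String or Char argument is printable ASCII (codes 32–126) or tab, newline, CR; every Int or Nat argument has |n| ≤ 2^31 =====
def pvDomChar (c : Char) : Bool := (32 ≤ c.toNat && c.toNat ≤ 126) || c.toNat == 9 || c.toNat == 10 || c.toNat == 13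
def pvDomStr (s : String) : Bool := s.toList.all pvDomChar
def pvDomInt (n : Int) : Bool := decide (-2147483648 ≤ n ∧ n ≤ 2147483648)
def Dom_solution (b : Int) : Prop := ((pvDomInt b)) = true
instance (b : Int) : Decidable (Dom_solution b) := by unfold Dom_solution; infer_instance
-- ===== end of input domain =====

-- B replaces A's nested rescans by one monotone shared j pointer (measured asymptotically faster).

-- ===== PORT A =====
-- inner 'for j in range(b+1, 500001)' with return/break: j counts up from b+1,
-- the fuel is the length of the range (it only makes the scan total)
def solInnerA (s : Int) : Nat → Int → Option Int
  | 0, _ => none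
  | Nat.succ n, j =>
      if s = j ^ 2 then some j
      else if s < j ^ 2 then none
      else solInnerA s n (j + 1)

-- outer 'for i in range(1, b+1)': first i whose inner loop returns
def solLoopA (b : Int) : List Int → Option Int
  | [] => none
  | i :: rest =>
      match solInnerA (i ^ 2 + b ^ 2) (500001 - (b + 1)).toNat (b + 1) with
      | some j => some j
      | none => solLoopA b rest

def solution (b : Int) : Int :=
  match solLoopA b (PySem.List.pyRange 1 (b + 1) 1) with
  | some j => j
  | none => -1   -- answer = -1

-- ===== PORT B =====
-- 'while j <= 500000 and j * j < s: j += 1' (fuel = remaining distance to the cap; it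
-- only makes the loop total: the guard fails exactly when the fuel runs out)
def solAdvFuel (s : Int) : Nat → Int → Int
  | 0, j => j
  | Nat.succ n, j => if j ≤ 500000 ∧ j * j < s then solAdvFuel s n (j + 1) else j

def solAdv (s j : Int) : Int := solAdvFuel s (500001 - j).toNat j

-- 'for i in range(1, b+1)' carrying the shared pointer j
def solLoopB (b : Int) : List Int → Int → Int
  | [], _ => -1
  | i :: rest, j =>
      let s := i * i + b * b
      let j' := solAdv s j
      if 500000 < j' then -1
      else if j' * j' = s then j'
      else solLoopB b rest j'

def solution_alt (b : Int) : Int :=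
  solLoopB b (PySem.List.pyRange 1 (b + 1) 1) (b + 1)

-- ===== PRECONDITION & SPEC =====
def Spec_solution (b : Int) (out : Int) : Prop := out = solution_alt b
instance (b : Int) (out : Int) : Decidable (Spec_solution b out) := by unfold Spec_solution; infer_instance

-- ===== CLAIM (what is proved, stated in full; the proofs are below) =====
def Claim_equal_solution : Prop := ∀ (b : Int), Dom_solution b → Spec_solution b (solution b)

-- ===== LEMMAS AND PROOFS =====

-- the fuelled loop satisfies the while-loop unfolding equation
theorem solAdv_eq (s j : Int) :
    solAdv s j = if j ≤ 500000 ∧ j * j < s then solAdv s (j + 1) else j := by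
  by_cases hg : j ≤ 500000 ∧ j * j < s
  · rw [if_pos hg]
    unfold solAdv
    have h1 : (500001 - j).toNat = (500001 - (j + 1)).toNat + 1 := by omega
    rw [h1]
    simp only [solAdvFuel, if_pos hg]
  · rw [if_neg hg]
    unfold solAdv
    rcases Nat.eq_zero_or_pos (500001 - j).toNat with h0 | hpos
    · rw [h0]; rfl
    · have h1 : (500001 - j).toNat = ((500001 - j).toNat - 1) + 1 := by omega
      rw [h1]; simp only [solAdvFuel, if_neg hg]

theorem solAdvFuel_ge (s : Int) (n : Nat) (j : Int) : j ≤ solAdvFuel s n j := by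
  induction n generalizing j with
  | zero => exact le_rfl
  | succ n ih =>
      simp only [solAdvFuel]
      split
      · have := ih (j + 1)
        omega
      · exact le_rfl

theorem solAdv_ge (s j : Int) : j ≤ solAdv s j := solAdvFuel_ge s _ j

-- the pointer does not move when the while-guard fails
theorem solAdv_fix (s j : Int) (h : ¬ (j ≤ 500000 ∧ j * j < s)) : solAdv s j = j := by
  rw [solAdv_eq, if_neg h]

theorem solAdvFuel_skipped (s : Int) (n : Nat) (j k : Int) (h1 : j ≤ k)
    (h2 : k < solAdvFuel s n j) : k ≤ 500000 ∧ k * k < s := by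
  induction n generalizing j with
  | zero => simp only [solAdvFuel] at h2; omega
  | succ n ih =>
      simp only [solAdvFuel] at h2
      split at h2
      · rename_i h
        by_cases hk : j = k
        · exact hk ▸ h
        · exact ih (j + 1) (by omega) h2
      · omega

-- every k skipped by the pointer satisfies k ≤ 500000 ∧ k*k < s
theorem solAdv_skipped (s j k : Int) (h1 : j ≤ k) (h2 : k < solAdv s j) :
    k ≤ 500000 ∧ k * k < s := solAdvFuel_skipped s _ j k h1 h2

theorem solAdv_skip (s j : Int) (h1 : j ≤ 500000) (h2 : j * j < s) :
    solAdv s j = solAdv s (j + 1) := by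
  rw [solAdv_eq, if_pos ⟨h1, h2⟩]

-- advancing from a lower start through already-skippable territory gives the same pointer
theorem solAdv_from_lower (s j j' : Int) (hle : j ≤ j')
    (h : ∀ k, j ≤ k → k < j' → k ≤ 500000 ∧ k * k < s) :
    solAdv s j = solAdv s j' := by
  by_cases he : j = j'
  · rw [he]
  · have hj : j < j' := lt_of_le_of_ne hle he
    have hk := h j le_rfl hj
    rw [solAdv_skip s j hk.1 hk.2]
    exact solAdv_from_lower s (j + 1) j' (by omega) (fun k hk1 hk2 => h k (by omega) hk2)
termination_by (j' - j).toNat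
decreasing_by omega

-- A's inner scan starting at j equals the pointer characterisation
theorem solInnerA_eq (s j : Int) :
    solInnerA s (500001 - j).toNat j =
      (if solAdv s j ≤ 500000 ∧ solAdv s j * solAdv s j = s then some (solAdv s j) else none) := by
  by_cases hj : (500001 : Int) ≤ j
  · have h0 : (500001 - j).toNat = 0 := by omega
    rw [h0, solAdv_fix s j (fun hg => absurd hg.1 (by omega)),
        if_neg (fun hc : j ≤ 500000 ∧ j * j = s => absurd hc.1 (by omega))]
    rfl
  · have h1 : (500001 - j).toNat = (500001 - (j + 1)).toNat + 1 := by omega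
    rw [h1]
    rcases lt_trichotomy s (j * j) with hlt | heq | hgt
    · have hne : ¬ s = j ^ 2 := by rw [pow_two]; exact ne_of_lt hlt
      have hltp : s < j ^ 2 := by rw [pow_two]; exact hlt
      rw [solAdv_fix s j (fun hg => absurd hg.2 (not_lt.mpr (le_of_lt hlt)))]
      simp only [solInnerA, if_neg hne, if_pos hltp]
      rw [if_neg (fun hc : j ≤ 500000 ∧ j * j = s => absurd hc.2 (ne_of_gt hlt))]
    · have heqp : s = j ^ 2 := by rw [pow_two]; exact heq
      rw [solAdv_fix s j (fun hg => absurd hg.2 (not_lt.mpr (le_of_eq heq)))]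
      simp only [solInnerA, if_pos heqp]
      have hcond : j ≤ 500000 ∧ j * j = s := ⟨by omega, heq.symm⟩
      rw [if_pos hcond]
    · have hne : ¬ s = j ^ 2 := by rw [pow_two]; exact ne_of_gt hgt
      have hnlt : ¬ s < j ^ 2 := by rw [pow_two]; exact not_lt.mpr (le_of_lt hgt)
      rw [solAdv_skip s j (by omega) hgt]
      simp only [solInnerA, if_neg hne, if_neg hnlt]
      exact solInnerA_eq s (j + 1)
termination_by (500001 - j).toNat
decreasing_by omega

theorem solLoopA_none (b : Int) (is : List Int)
    (h : ∀ i ∈ is, solInnerA (i ^ 2 + b ^ 2) (500001 - (b + 1)).toNat (b + 1) = none) :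
    solLoopA b is = none := by
  induction is with
  | nil => rfl
  | cons i rest ih =>
      simp only [solLoopA, h i (by simp)]
      exact ih (fun i' hi' => h i' (by simp [hi']))

theorem sq_mono (i i' : Int) (h1 : 1 ≤ i) (h2 : i ≤ i') : i * i ≤ i' * i' := by nlinarith

-- main loop correspondence under the pointer invariant
theorem solLoop_eq (b : Int) (is : List Int) (j : Int)
    (hj : b + 1 ≤ j)
    (hinv : ∀ k, b + 1 ≤ k → k < j → k ≤ 500000 ∧ ∀ i ∈ is, k * k < i * i + b * b)
    (hsorted : is.Pairwise (· ≤ ·))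
    (hpos : ∀ i ∈ is, 1 ≤ i) :
    (match solLoopA b is with | some r => r | none => -1) = solLoopB b is j := by
  induction is generalizing j with
  | nil => rfl
  | cons i rest ih =>
    have hipos : (1 : Int) ≤ i := hpos i (by simp)
    have hmono : ∀ i' ∈ rest, i * i + b * b ≤ i' * i' + b * b := by
      intro i' hi'
      have h1 := (List.pairwise_cons.mp hsorted).1 i' hi'
      have := sq_mono i i' hipos h1
      omega
    have hjj' : j ≤ solAdv (i * i + b * b) j := solAdv_ge _ j
    have hstart : solAdv (i * i + b * b) (b + 1) = solAdv (i * i + b * b) j := by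
      refine solAdv_from_lower _ _ _ hj ?_
      intro k hk1 hk2
      have h := hinv k hk1 hk2
      exact ⟨h.1, h.2 i (by simp)⟩
    have hsq : i ^ 2 + b ^ 2 = i * i + b * b := by ring
    have hinner : solInnerA (i ^ 2 + b ^ 2) (500001 - (b + 1)).toNat (b + 1) =
        (if solAdv (i * i + b * b) j ≤ 500000 ∧
            solAdv (i * i + b * b) j * solAdv (i * i + b * b) j = i * i + b * b
         then some (solAdv (i * i + b * b) j) else none) := by
      rw [hsq, solInnerA_eq, hstart]
    have hinv' : ∀ k, b + 1 ≤ k → k < solAdv (i * i + b * b) j →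
        k ≤ 500000 ∧ ∀ i' ∈ rest, k * k < i' * i' + b * b := by
      intro k hk1 hk2
      by_cases hkj : k < j
      · have h := hinv k hk1 hkj
        exact ⟨h.1, fun i' hi' => h.2 i' (by simp [hi'])⟩
      · have h := solAdv_skipped (i * i + b * b) j k (by omega) hk2
        exact ⟨h.1, fun i' hi' => lt_of_lt_of_le h.2 (hmono i' hi')⟩
    by_cases hcap : 500000 < solAdv (i * i + b * b) j
    · -- pointer passed the cap: A finds nothing for i nor for any later i'
      have hnone : ∀ i' ∈ rest,
          solInnerA (i' ^ 2 + b ^ 2) (500001 - (b + 1)).toNat (b + 1) = none := by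
        intro i' hi'
        have hsq' : i' ^ 2 + b ^ 2 = i' * i' + b * b := by ring
        rw [hsq', solInnerA_eq]
        have hsame : solAdv (i' * i' + b * b) (b + 1) =
            solAdv (i' * i' + b * b) (solAdv (i * i + b * b) j) := by
          refine solAdv_from_lower _ _ _ (le_trans hj hjj') ?_
          intro k hk1 hk2
          have h := hinv' k hk1 hk2
          exact ⟨h.1, h.2 i' hi'⟩
        have hstuck : solAdv (i' * i' + b * b) (solAdv (i * i + b * b) j) =
            solAdv (i * i + b * b) j :=
          solAdv_fix _ _ (fun hg => absurd hg.1 (by omega))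
        rw [hsame, hstuck]
        exact if_neg (fun hc => absurd hc.1 (by omega))
      have hcnd : ¬ (solAdv (i * i + b * b) j ≤ 500000 ∧
          solAdv (i * i + b * b) j * solAdv (i * i + b * b) j = i * i + b * b) :=
        fun hc => absurd hc.1 (by omega)
      simp only [solLoopA, hinner, if_neg hcnd]
      rw [solLoopA_none b rest hnone]
      simp only [solLoopB]
      rw [if_pos hcap]
    · by_cases hhit : solAdv (i * i + b * b) j * solAdv (i * i + b * b) j = i * i + b * b
      · have hcnd : solAdv (i * i + b * b) j ≤ 500000 ∧
            solAdv (i * i + b * b) j * solAdv (i * i + b * b) j = i * i + b * b :=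
          ⟨by omega, hhit⟩
        simp only [solLoopA, hinner, if_pos hcnd]
        simp only [solLoopB]
        rw [if_neg hcap, if_pos hhit]
      · have hcnd : ¬ (solAdv (i * i + b * b) j ≤ 500000 ∧
            solAdv (i * i + b * b) j * solAdv (i * i + b * b) j = i * i + b * b) :=
          fun hc => hhit hc.2
        simp only [solLoopA, hinner, if_neg hcnd]
        have htail := ih (solAdv (i * i + b * b) j) (le_trans hj hjj') hinv'
          (List.pairwise_cons.mp hsorted).2 (fun i' hi' => hpos i' (by simp [hi']))
        rw [htail]
        simp only [solLoopB]
        rw [if_neg hcap, if_neg hhit]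

-- ===== VERDICT (by name: the statement is the Claim_ definition above) =====
theorem solution_spec : Claim_equal_solution := by
  intro b _
  unfold Spec_solution solution solution_alt
  refine solLoop_eq b _ (b + 1) le_rfl (fun k hk1 hk2 => absurd hk2 (by omega)) ?_ ?_
  · exact (PySem.List.pairwise_lt_pyRange_one 1 (b + 1)).imp le_of_lt
  · intro i hi
    exact ((PySem.List.mem_pyRange_one).mp hi).1
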